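-- pv_equiv track=rewrite | github.com/VitoMakarevich/leetcode | 3649-number-of-perfect-pairs/3649-number-of-perfect-pairs.py | perfectPairs
-- ===== SOURCE A (Python) =====
-- from typing import List
--
-- def perfectPairs(nums: List[int]) -> int:
--   res = 0
--   abs_n = [abs(n) for n in nums]
--   abs_n.sort()
--   i = 0
--   j = 1
--   while i < len(nums):
--     while j < len(nums) and abs_n[j] <= abs_n[i] * 2:
--       j += 1
--     res += j - i - 1
--     i += 1
--   return res
-- ===== SOURCE B (Python) =====
-- def perfectPairs(nums):
--     abs_n = sorted(abs(x) for x in nums)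
--     n = len(abs_n)
--     res = 0
--     for i in range(n):
--         t = 2 * abs_n[i]
--         # bisect_right(abs_n, t) by hand
--         lo, hi = 0, n
--         while lo < hi:
--             mid = (lo + hi) // 2
--             if abs_n[mid] <= t:
--                 lo = mid + 1
--             else:
--                 hi = mid
--         res += lo - i - 1
--     return res
-- ===== Notes on version B (the rewrite author's own statement) =====
-- stated objective: idiomatic
-- what changed: Replaced A's monotonically advancing two-pointer j with an independent binary search (bisect_right by hand) per element locating the first index whose value exceeds 2*abs_n[i].
import Mathlib
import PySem

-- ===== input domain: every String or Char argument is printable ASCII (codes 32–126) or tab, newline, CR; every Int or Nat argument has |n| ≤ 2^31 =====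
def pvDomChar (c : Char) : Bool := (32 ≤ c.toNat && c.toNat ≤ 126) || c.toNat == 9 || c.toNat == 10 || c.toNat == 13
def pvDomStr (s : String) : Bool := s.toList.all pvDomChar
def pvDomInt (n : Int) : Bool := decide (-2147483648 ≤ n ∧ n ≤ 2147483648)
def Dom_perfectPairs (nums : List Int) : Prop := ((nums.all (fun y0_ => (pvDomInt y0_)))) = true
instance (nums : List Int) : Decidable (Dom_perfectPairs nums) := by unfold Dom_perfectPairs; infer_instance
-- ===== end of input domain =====

-- B replaces A's monotonically advancing two-pointer j with an independent
-- binary search (a hand-written bisect_right) per element; same O(n log n) cost.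

-- ===== PORT A =====
-- inner `while j < len(nums) and abs_n[j] <= abs_n[i] * 2` loop (t = abs_n[i] * 2)
def pvInnerA (a : List Int) (t : Int) (j : Nat) : Nat :=
  if j < a.length then
    if a.getD j 0 ≤ t then pvInnerA a t (j + 1) else j
  else j
termination_by a.length - j

-- outer `while i < len(nums)` loop over state (i, j, res)
def pvOuterA (a : List Int) (i j : Nat) (res : Int) : Int :=
  if i < a.length then
    let j' := pvInnerA a (a.getD i 0 * 2) j
    pvOuterA a (i + 1) j' (res + (j' : Int) - (i : Int) - 1)
  else res
termination_by a.length - i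

def perfectPairs (nums : List Int) : Int :=
  let abs_n := PySem.List.sorted (nums.map (fun n => |n|)) (fun x => x) false
  pvOuterA abs_n 0 1 0

-- ===== PORT B =====
-- hand-written bisect_right loop of Source B: `while lo < hi: mid = (lo+hi)//2; ...`
def pvBisect (a : List Int) (t : Int) (lo hi : Nat) : Nat :=
  if lo < hi then
    let mid := (lo + hi) / 2
    if a.getD mid 0 ≤ t then pvBisect a t (mid + 1) hi else pvBisect a t lo mid
  else lo
termination_by hi - lo
decreasing_by all_goals omega

def perfectPairs_alt (nums : List Int) : Int :=
  let abs_n := PySem.List.sorted (nums.map (fun x => |x|)) (fun x => x) false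
  (List.range abs_n.length).foldl
    (fun res i =>
      res + ((pvBisect abs_n (2 * abs_n.getD i 0) 0 abs_n.length : Int) - (i : Int) - 1)) 0

-- ===== PRECONDITION & SPEC =====
def Spec_perfectPairs (nums : List Int) (out : Int) : Prop := out = perfectPairs_alt nums
instance (nums : List Int) (out : Int) : Decidable (Spec_perfectPairs nums out) := by unfold Spec_perfectPairs; infer_instance

-- ===== CLAIM (what is proved, stated in full; the proofs are below) =====
def Claim_equal_perfectPairs : Prop := ∀ (nums : List Int), Dom_perfectPairs nums → Spec_perfectPairs nums (perfectPairs nums)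

-- ===== LEMMAS AND PROOFS =====

-- C a t = number of leading elements ≤ t = bisect_right position in a sorted list
def pvC (a : List Int) (t : Int) : Nat := (a.takeWhile (fun x => decide (x ≤ t))).length

theorem pvC_le_length (a : List Int) (t : Int) : pvC a t ≤ a.length := by
  unfold pvC; induction a with
  | nil => simp
  | cons x xs ih => by_cases h : x ≤ t <;> simp [List.takeWhile, h] <;> omega

theorem pvC_getD_lt (a : List Int) (t : Int) : ∀ k, k < pvC a t → a.getD k 0 ≤ t := by
  unfold pvC; induction a with
  | nil => simp
  | cons x xs ih =>
    intro k hk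
    by_cases h : x ≤ t
    · cases k with
      | zero => simpa using h
      | succ k =>
        simp only [List.takeWhile, h, decide_true, List.length_cons] at hk
        simpa using ih k (by omega)
    · simp [List.takeWhile, h] at hk

theorem pvC_getD_self (a : List Int) (t : Int) (h : pvC a t < a.length) :
    t < a.getD (pvC a t) 0 := by
  unfold pvC at *; induction a with
  | nil => simp at h
  | cons x xs ih =>
    by_cases hx : x ≤ t
    · simp only [List.takeWhile, hx, decide_true, List.length_cons] at h ⊢
      simpa using ih (by simpa using h)
    · simp [List.takeWhile, hx] at h ⊢; omega

theorem pvC_mono (a : List Int) {t t' : Int} (h : t ≤ t') : pvC a t ≤ pvC a t' := by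
  unfold pvC; induction a with
  | nil => simp
  | cons x xs ih =>
    by_cases hx : x ≤ t
    · simp [List.takeWhile, hx, le_trans hx h]; omega
    · simp [List.takeWhile, hx]

-- with sortedness: the converse of pvC_getD_lt
theorem pvC_lt_of_getD_le (a : List Int) (t : Int)
    (hs : ∀ p q : Nat, p ≤ q → q < a.length → a.getD p 0 ≤ a.getD q 0)
    {k : Nat} (hk : k < a.length) (hle : a.getD k 0 ≤ t) : k < pvC a t := by
  by_contra hc
  have hC : pvC a t < a.length := lt_of_le_of_lt (by omega) hk
  have h1 := pvC_getD_self a t hC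
  have h2 := hs (pvC a t) k (by omega) hk
  omega

theorem pvInnerA_eq (a : List Int) (t : Int) :
    ∀ d j, pvC a t - j = d → j ≤ pvC a t → pvInnerA a t j = pvC a t := by
  intro d
  induction d with
  | zero =>
    intro j hd hj
    have hj' : j = pvC a t := by omega
    subst hj'
    rw [pvInnerA]
    by_cases h : pvC a t < a.length
    · have hgt := pvC_getD_self a t h
      rw [if_pos h, if_neg (by omega)]
    · rw [if_neg h]
  | succ d ih =>
    intro j hd hj
    have hjC : j < pvC a t := by omega
    have hjl : j < a.length := lt_of_lt_of_le hjC (pvC_le_length a t)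
    rw [pvInnerA]
    simp only [hjl, if_true, pvC_getD_lt a t j hjC, if_true]
    exact ih (j + 1) (by omega) (by omega)

theorem pvBisect_eq (a : List Int) (t : Int)
    (hs : ∀ p q : Nat, p ≤ q → q < a.length → a.getD p 0 ≤ a.getD q 0) :
    ∀ d lo hi, hi - lo ≤ d → lo ≤ pvC a t → pvC a t ≤ hi → hi ≤ a.length →
      pvBisect a t lo hi = pvC a t := by
  intro d
  induction d with
  | zero =>
    intro lo hi hd h1 h2 h3
    rw [pvBisect]
    have : ¬ lo < hi := by omega
    simp [this]; omega
  | succ d ih =>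
    intro lo hi hd h1 h2 h3
    by_cases hlt : lo < hi
    case neg =>
      rw [pvBisect]
      simp [hlt]; omega
    rw [pvBisect]
    simp only [hlt, if_true]
    set mid := (lo + hi) / 2 with hmid
    have hm1 : lo ≤ mid := by omega
    have hm2 : mid < hi := by omega
    by_cases hc : a.getD mid 0 ≤ t
    · simp only [hc, if_true]
      have : mid < pvC a t := pvC_lt_of_getD_le a t hs (by omega) hc
      exact ih (mid + 1) hi (by omega) (by omega) h2 h3
    · simp only [hc, if_false]
      have : pvC a t ≤ mid := by
        by_contra h
        exact hc (pvC_getD_lt a t mid (by omega))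
      exact ih lo mid (by omega) h1 this (by omega)

theorem pvOuterA_eq (a : List Int)
    (hs : ∀ p q : Nat, p ≤ q → q < a.length → a.getD p 0 ≤ a.getD q 0) :
    ∀ d i j res, a.length - i = d →
      (i < a.length → j ≤ pvC a (a.getD i 0 * 2)) →
      pvOuterA a i j res =
        (List.range' i (a.length - i)).foldl
          (fun r k => r + ((pvC a (a.getD k 0 * 2) : Int) - (k : Int) - 1)) res := by
  intro d
  induction d with
  | zero =>
    intro i j res hd hj
    have : ¬ i < a.length := by omega
    rw [pvOuterA]
    simp [this, show a.length - i = 0 by omega]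
  | succ d ih =>
    intro i j res hd hj
    have hi : i < a.length := by omega
    rw [pvOuterA]
    simp only [hi, if_true]
    have hj' : pvInnerA a (a.getD i 0 * 2) j = pvC a (a.getD i 0 * 2) :=
      pvInnerA_eq a _ _ j rfl (hj hi)
    rw [hj']
    have hnext : i + 1 < a.length → pvC a (a.getD i 0 * 2) ≤ pvC a (a.getD (i + 1) 0 * 2) := by
      intro h
      exact pvC_mono a (by have := hs i (i + 1) (by omega) h; omega)
    rw [ih (i + 1) _ _ (by omega) hnext]
    have hr : a.length - i = (a.length - (i + 1)) + 1 := by omega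
    rw [hr, List.range'_succ]
    simp [List.foldl_cons]
    ring_nf

theorem sortedAbs_props (nums : List Int) :
    (∀ p q : Nat, p ≤ q →
        q < (PySem.List.sorted (nums.map (fun n => |n|)) (fun x => x) false).length →
        (PySem.List.sorted (nums.map (fun n => |n|)) (fun x => x) false).getD p 0 ≤
        (PySem.List.sorted (nums.map (fun n => |n|)) (fun x => x) false).getD q 0) ∧
    (∀ x ∈ PySem.List.sorted (nums.map (fun n => |n|)) (fun x => x) false, 0 ≤ x) := by
  constructor
  · intro p q hpq hq
    rw [List.getD_eq_getElem _ _ (by omega), List.getD_eq_getElem _ _ hq]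
    exact PySem.List.sorted_id_getElem_mono _ hpq hq
  · intro x hx
    rw [PySem.List.mem_sorted] at hx
    obtain ⟨y, _, rfl⟩ := List.mem_map.mp hx
    exact abs_nonneg y

-- ===== VERDICT (by name: the statement is the Claim_ definition above) =====
theorem perfectPairs_spec : Claim_equal_perfectPairs := by
  intro nums _
  unfold Spec_perfectPairs perfectPairs perfectPairs_alt
  set a := PySem.List.sorted (nums.map (fun n => |n|)) (fun x => x) false with ha
  obtain ⟨hs, hnn⟩ := sortedAbs_props nums
  rw [← ha] at hs hnn
  have hinit : 0 < a.length → 1 ≤ pvC a (a.getD 0 0 * 2) := by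
    intro h
    have h0 : 0 ≤ a.getD 0 0 := by
      rcases a with _ | ⟨x, xs⟩
      · simp at h
      · exact hnn x (by simp)
    exact pvC_lt_of_getD_le a _ hs h (by omega)
  rw [pvOuterA_eq a hs (a.length - 0) 0 1 0 rfl (fun h => hinit h)]
  rw [show a.length - 0 = a.length from rfl, ← List.range_eq_range']
  have hfun : ∀ (r : Int) (i : Nat),
      r + ((pvBisect a (2 * a.getD i 0) 0 a.length : Int) - (i : Int) - 1) =
      r + ((pvC a (a.getD i 0 * 2) : Int) - (i : Int) - 1) := by
    intro r i
    rw [pvBisect_eq a (2 * a.getD i 0) hs a.length 0 a.length (by omega)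
        (Nat.zero_le _) (pvC_le_length a _) (le_refl _),
      mul_comm]
  have hfe : (fun (res : Int) (i : Nat) =>
      res + ((pvBisect a (2 * a.getD i 0) 0 a.length : Int) - (i : Int) - 1)) =
      (fun (r : Int) (k : Nat) => r + ((pvC a (a.getD k 0 * 2) : Int) - (k : Int) - 1)) := by
    funext r i; exact hfun r i
  rw [← hfe]
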